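-- pv_equiv track=rewrite | github.com/XucroYuri/LocalVideo | backend/app/stages/_video_types.py | _resolve_stage_runtime_provider
-- ===== SOURCE A (Python) =====
-- from typing import Any
--
-- def _resolve_stage_runtime_provider(
--     items: list[dict[str, Any]],
--     fallback_provider_name: str,
-- ) -> str:
--     providers = {
--         str(item.get("runtime_provider") or item.get("video_provider") or "").strip()
--         for item in items
--         if isinstance(item, dict)
--     }
--     providers.discard("")
--     if len(providers) == 1:
--         return next(iter(providers))
--     if len(providers) > 1:
--         return "mixed"
--     return fallback_provider_name
-- ===== SOURCE B (Python) =====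
-- def _resolve_stage_runtime_provider(items, fallback_provider_name):
--     names = [
--         str(item.get("runtime_provider") or item.get("video_provider") or "").strip()
--         for item in items
--         if isinstance(item, dict)
--     ]
--     names = sorted(n for n in names if n)
--     if not names:
--         return fallback_provider_name
--     return names[0] if names[0] == names[-1] else "mixed"
-- ===== Notes on version B (the rewrite author's own statement) =====
-- stated objective: alternative
-- what changed: Replaces the set comprehension and cardinality branching with two staged passes: collect the coalesced names, sort the nonempty ones, and decide by comparing the first and last element of the sorted list (equal extremes = single provider, different = mixed, empty = fallback).
import Mathlib
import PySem

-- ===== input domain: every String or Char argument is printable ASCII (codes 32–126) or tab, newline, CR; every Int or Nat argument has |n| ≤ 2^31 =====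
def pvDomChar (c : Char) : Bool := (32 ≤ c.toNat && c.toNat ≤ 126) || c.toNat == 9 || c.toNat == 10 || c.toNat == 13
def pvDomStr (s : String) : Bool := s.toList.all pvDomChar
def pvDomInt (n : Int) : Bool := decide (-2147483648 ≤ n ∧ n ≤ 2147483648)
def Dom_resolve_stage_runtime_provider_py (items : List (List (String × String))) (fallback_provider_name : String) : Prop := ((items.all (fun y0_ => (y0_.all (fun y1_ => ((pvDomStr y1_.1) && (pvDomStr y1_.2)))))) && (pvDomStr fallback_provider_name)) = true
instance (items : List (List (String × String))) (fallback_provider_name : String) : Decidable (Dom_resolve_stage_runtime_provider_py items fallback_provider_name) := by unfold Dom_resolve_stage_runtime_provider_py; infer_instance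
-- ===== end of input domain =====

-- B replaces A's set build + cardinality branching by sorting the nonempty names and
-- comparing the sorted list's first and last element (objective: alternative; same value).

-- ===== PORT A =====
-- shared helper: `str(item.get("runtime_provider") or item.get("video_provider") or "").strip()`
-- (the identical subexpression occurs verbatim in both Pythons); `x or y` on str/None falls
-- through on None and "".
def pvOrStr (o : Option String) (k : String) : String :=
  match o with
  | some s => if s = "" then k else s
  | none => k

def pvName (item : List (String × String)) : String :=
  PySem.Str.strip (pvOrStr (PySem.Dict.get? ⟨item⟩ "runtime_provider")
    (pvOrStr (PySem.Dict.get? ⟨item⟩ "video_provider") ""))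

-- the set comprehension (every item is a dict under the type convention, so the
-- isinstance filter keeps everything), then providers.discard(""), then the len branches;
-- next(iter(providers)) on a one-element set is its only element.
def pvProviders (items : List (List (String × String))) : PySem.Set String :=
  PySem.Set.discard (PySem.Set.ofList (items.map pvName)) ""

def resolve_stage_runtime_provider_py (items : List (List (String × String))) (fallback_provider_name : String) : String :=
  let providers : PySem.Set String := pvProviders items
  if providers.length = 1 then providers.headD ""
  else if 1 < providers.length then "mixed"
  else fallback_provider_name

-- ===== PORT B =====
-- Source B: first pass collects the names, second keeps the nonempty ones and sorts them,
-- then names[0] / names[-1] of the (nonempty) sorted list are its head and getLast.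
def resolve_stage_runtime_provider_py_alt (items : List (List (String × String))) (fallback_provider_name : String) : String :=
  let names0 := items.map pvName
  let names := PySem.List.sorted (names0.filter (fun n => decide (n ≠ ""))) (fun x => x) false
  match names with
  | [] => fallback_provider_name
  | h :: t => if (h :: t).getLast (by simp) = h then h else "mixed"

-- ===== PRECONDITION & SPEC =====
def Spec_resolve_stage_runtime_provider_py (items : List (List (String × String))) (fallback_provider_name : String) (out : String) : Prop := out = resolve_stage_runtime_provider_py_alt items fallback_provider_name
instance (items : List (List (String × String))) (fallback_provider_name : String) (out : String) : Decidable (Spec_resolve_stage_runtime_provider_py items fallback_provider_name out) := by unfold Spec_resolve_stage_runtime_provider_py; infer_instance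

-- ===== CLAIM (what is proved, stated in full; the proofs are below) =====
def Claim_equal_resolve_stage_runtime_provider_py : Prop := ∀ (items : List (List (String × String))) (fallback_provider_name : String), Dom_resolve_stage_runtime_provider_py items fallback_provider_name → Spec_resolve_stage_runtime_provider_py items fallback_provider_name (resolve_stage_runtime_provider_py items fallback_provider_name)

-- ===== LEMMAS AND PROOFS =====

-- in a (·≤·)-pairwise list every element is ≤ the last one
lemma pv_le_getLast {s : List String} (hp : s.Pairwise (· ≤ ·)) (h : s ≠ []) :
    ∀ y ∈ s, y ≤ s.getLast h := by
  intro y hy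
  obtain ⟨i, hi, hyi⟩ := List.mem_iff_getElem.mp hy
  rw [List.getLast_eq_getElem, ← hyi]
  rcases Nat.lt_or_ge i (s.length - 1) with hlt | hge
  · exact List.pairwise_iff_getElem.mp hp i (s.length - 1) hi (by omega) hlt
  · have : i = s.length - 1 := by omega
    subst this
    exact le_refl _

theorem resolve_stage_runtime_provider_py_spec : Claim_equal_resolve_stage_runtime_provider_py := by
  intro items fallback _dom
  unfold Spec_resolve_stage_runtime_provider_py
  unfold resolve_stage_runtime_provider_py resolve_stage_runtime_provider_py_alt
  dsimp only
  have hnodup : (pvProviders items).Nodup := by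
    unfold pvProviders
    exact PySem.Set.nodup_discard _ _ (PySem.Set.nodup_ofList _)
  have hmem : ∀ x, x ∈ pvProviders items ↔
      x ∈ (items.map pvName).filter (fun x => x ≠ "") := by
    intro x
    unfold pvProviders
    simp [PySem.Set.mem_discard, PySem.Set.mem_ofList, List.mem_filter]
  generalize hgen : pvProviders items = d at hnodup hmem ⊢
  cases hfl : (items.map pvName).filter (fun x => x ≠ "") with
  | nil =>
    rw [hfl] at hmem
    have hdnil : d = [] := by
      apply List.eq_nil_iff_forall_not_mem.mpr
      intro x hx
      simpa using (hmem x).mp hx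
    simp [hdnil, PySem.List.sorted]
  | cons h t =>
    rw [hfl] at hmem
    have hhd : h ∈ d := (hmem h).mpr (by simp)
    -- the sorted nonempty list
    have hperm : (PySem.List.sorted (h :: t) (fun x => x) false).Perm (h :: t) :=
      PySem.List.sorted_perm _ _ _
    have hsne : PySem.List.sorted (h :: t) (fun x => x) false ≠ [] := by
      intro hnil
      have := hperm.length_eq
      simp [hnil] at this
    obtain ⟨m, t', hs⟩ : ∃ m t', PySem.List.sorted (h :: t) (fun x => x) false = m :: t' := by
      cases hsc : PySem.List.sorted (h :: t) (fun x => x) false with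
      | nil => exact absurd hsc hsne
      | cons a b => exact ⟨a, b, rfl⟩
    rw [hs]
    by_cases hall : ∀ x ∈ (h :: t : List String), x = h
    · -- all nonempty names equal h: d = [h], sorted list is all h, both sides return h
      have hdone : d = [h] := by
        match d, hnodup, hhd with
        | [], _, hhd => simp at hhd
        | a :: rest, hnodup, hhd =>
          have ha : a = h := hall a ((hmem a).mp (by simp))
          have hrest : rest = [] := by
            apply List.eq_nil_iff_forall_not_mem.mpr
            intro y hy
            have hyh : y = h := hall y ((hmem y).mp (by simp [hy]))
            have hnr : a ∉ rest := (List.nodup_cons.mp hnodup).1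
            exact hnr (by rw [ha, ← hyh]; exact hy)
          rw [ha, hrest]
      have hm : m = h := hall m (hperm.mem_iff.mp (by simp [hs]))
      have hperm' : (m :: t').Perm (h :: t) := hs ▸ hperm
      have hlast : (m :: t').getLast (by simp) = m := by
        have hin : (m :: t').getLast (by simp) ∈ (m :: t') := List.getLast_mem _
        rw [hall _ (hperm'.mem_iff.mp hin), hm]
      rw [hdone]
      simp only [List.length_cons, List.length_nil, List.headD_cons]
      simp [hm]
      intro hne
      exact absurd (hm ▸ hlast) hne
    · -- some nonempty name differs from h: |d| ≥ 2 and the sorted extremes differ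
      push Not at hall
      obtain ⟨x, hxt, hxh⟩ := hall
      have hxd : x ∈ d := (hmem x).mpr hxt
      have hlen : 1 < d.length := by
        match d, hnodup with
        | [], _ => simp at hhd
        | [a], _ =>
          simp at hhd hxd
          exact absurd (hxd.trans hhd.symm) hxh
        | a :: b :: rest, _ => simp
      rw [if_neg (by omega), if_pos hlen]
      have hlastne : (m :: t').getLast (by simp) ≠ m := by
        intro heq
        -- m is ≤ every name; every sorted element is ≤ the last = m; so all names = m
        have hmin : ∀ y ∈ (h :: t : List String), m ≤ y :=
          PySem.List.key_head_sorted_le _ _ hs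
        have hpw : (m :: t').Pairwise (· ≤ ·) := by
          have := PySem.List.sorted_pairwise (xs := (h :: t : List String)) (key := fun x => x)
          rwa [hs] at this
        have hmax : ∀ y ∈ (m :: t'), y ≤ m := by
          intro y hy
          have := pv_le_getLast hpw (by simp) y hy
          rwa [heq] at this
        have hallm : ∀ y ∈ (h :: t : List String), y = m := by
          intro y hy
          have h1 := hmin y hy
          have h2 := hmax y (by rw [← hs]; exact hperm.mem_iff.mpr hy)
          exact le_antisymm h2 h1
        have hh : h = m := hallm h (by simp)
        have hx : x = m := hallm x hxt
        exact hxh (hx.trans hh.symm)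
      simp [hlastne]
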